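-- pv_equiv track=rewrite | github.com/SecurityWard/honeyman-Project | src/detectors/wifi_enhanced_detector.py | _is_common_oui_pairing
-- ===== SOURCE A (Python) =====
-- def _is_common_oui_pairing(oui1, oui2):
--     """
--     Check if two different OUIs commonly appear together in legitimate networks.
--     Some vendors use multiple OUI ranges or partner equipment.
--     """
--     # Common legitimate OUI pairings (simplified list)
--     common_pairings = [
--         # Cisco equipment often mixed
--         {'00:1b:d5', '00:26:ca', '00:23:04'},
--         # Apple ecosystem
--         {'00:17:f2', '00:1f:f3', '00:25:00'},
--         # Ubiquiti networks
--         {'00:15:6d', '04:18:d6', '24:a4:3c'},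
--     ]
--
--     for pairing in common_pairings:
--         if oui1 in pairing and oui2 in pairing:
--             return True
--
--     return False
-- ===== SOURCE B (Python) =====
-- # B: precomputed flat OUI -> group-index table; one dict lookup per argument
-- # instead of scanning a list of sets. (idiomatic/alternative, not claimed faster)
-- _OUI_GROUPS = (
--     ('00:1b:d5', '00:26:ca', '00:23:04'),   # Cisco
--     ('00:17:f2', '00:1f:f3', '00:25:00'),   # Apple
--     ('00:15:6d', '04:18:d6', '24:a4:3c'),   # Ubiquiti
-- )
-- _OUI_INDEX = {}
-- for _i, _group in enumerate(_OUI_GROUPS):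
--     for _oui in _group:
--         _OUI_INDEX[_oui] = _i
--
-- def _is_common_oui_pairing(oui1, oui2):
--     g = _OUI_INDEX.get(oui1)
--     return g is not None and g == _OUI_INDEX.get(oui2)
-- ===== Notes on version B (the rewrite author's own statement) =====
-- stated objective: idiomatic
-- what changed: Replaces the runtime scan over a list of three sets (two membership tests per set) with a flat OUI->group-index dict built once at module load; the function body is a single dict lookup per argument plus an index comparison.
import Mathlib
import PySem

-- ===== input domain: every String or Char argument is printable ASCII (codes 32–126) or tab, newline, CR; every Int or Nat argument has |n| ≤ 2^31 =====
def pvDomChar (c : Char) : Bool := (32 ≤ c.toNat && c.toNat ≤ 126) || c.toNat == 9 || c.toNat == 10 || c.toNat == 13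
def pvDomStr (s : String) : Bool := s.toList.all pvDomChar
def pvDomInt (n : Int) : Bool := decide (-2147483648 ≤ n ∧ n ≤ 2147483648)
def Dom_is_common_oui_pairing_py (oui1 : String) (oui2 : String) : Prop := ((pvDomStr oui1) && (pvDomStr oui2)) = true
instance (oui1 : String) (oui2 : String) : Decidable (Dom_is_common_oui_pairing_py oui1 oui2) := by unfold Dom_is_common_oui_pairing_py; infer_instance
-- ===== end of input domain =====

-- B replaces A's per-call scan over a list of three OUI sets with a flat
-- OUI -> group-index table built once; one lookup per argument, then compare indices.

-- ===== PORT A =====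
-- the literal 'common_pairings' list of set literals from A
def pvCommonPairings : List (PySem.Set String) :=
  [PySem.Set.ofList ["00:1b:d5", "00:26:ca", "00:23:04"],
   PySem.Set.ofList ["00:17:f2", "00:1f:f3", "00:25:00"],
   PySem.Set.ofList ["00:15:6d", "04:18:d6", "24:a4:3c"]]

-- 'for pairing in common_pairings: if oui1 in pairing and oui2 in pairing: return True' / 'return False'
def pvLoopA (oui1 oui2 : String) : List (PySem.Set String) → Bool
  | [] => false
  | pairing :: rest =>
    if PySem.Set.contains pairing oui1 && PySem.Set.contains pairing oui2 then true
    else pvLoopA oui1 oui2 rest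

def is_common_oui_pairing_py (oui1 : String) (oui2 : String) : Bool :=
  pvLoopA oui1 oui2 pvCommonPairings

-- ===== PORT B =====
def pvOuiGroups : List (List String) :=
  [["00:1b:d5", "00:26:ca", "00:23:04"],
   ["00:17:f2", "00:1f:f3", "00:25:00"],
   ["00:15:6d", "04:18:d6", "24:a4:3c"]]

-- module-level build: for i, group in enumerate(groups): for oui in group: INDEX[oui] = i
def pvOuiIndex : PySem.Dict String Int :=
  (PySem.List.enumerate pvOuiGroups).foldl
    (fun d (p : Int × List String) =>
      p.2.foldl (fun d' oui => d'.insert oui p.1) d)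
    PySem.Dict.empty

-- g = INDEX.get(oui1); return g is not None and g == INDEX.get(oui2)
def is_common_oui_pairing_py_alt (oui1 : String) (oui2 : String) : Bool :=
  match pvOuiIndex.get? oui1 with
  | none => false
  | some g => pvOuiIndex.get? oui2 == some g

-- ===== PRECONDITION & SPEC =====
def Spec_is_common_oui_pairing_py (oui1 : String) (oui2 : String) (out : Bool) : Prop := out = is_common_oui_pairing_py_alt oui1 oui2
instance (oui1 : String) (oui2 : String) (out : Bool) : Decidable (Spec_is_common_oui_pairing_py oui1 oui2 out) := by unfold Spec_is_common_oui_pairing_py; infer_instance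

-- ===== CLAIM (what is proved, stated in full; the proofs are below) =====
def Claim_equal_is_common_oui_pairing_py : Prop := ∀ (oui1 : String) (oui2 : String), Dom_is_common_oui_pairing_py oui1 oui2 → Spec_is_common_oui_pairing_py oui1 oui2 (is_common_oui_pairing_py oui1 oui2)

-- ===== LEMMAS AND PROOFS =====
theorem pv_get?_nil {v : Type} (o : String) : (PySem.Dict.mk ([] : List (String × v))).get? o = none := rfl

-- B's table build, evaluated once to its literal association list
theorem pvOuiIndex_eval : pvOuiIndex = PySem.Dict.mk
    [("00:1b:d5", 0), ("00:26:ca", 0), ("00:23:04", 0),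
     ("00:17:f2", 1), ("00:1f:f3", 1), ("00:25:00", 1),
     ("00:15:6d", 2), ("04:18:d6", 2), ("24:a4:3c", 2)] := by rfl

-- case oui1 = "00:1b:d5": equality for every oui2, by cases on oui2
theorem pv_fix0 (o2 : String) : is_common_oui_pairing_py "00:1b:d5" o2 = is_common_oui_pairing_py_alt "00:1b:d5" o2 := by
  rcases eq_or_ne o2 "00:1b:d5" with rfl|k0
  · rfl
  rcases eq_or_ne o2 "00:26:ca" with rfl|k1
  · rfl
  rcases eq_or_ne o2 "00:23:04" with rfl|k2
  · rfl
  rcases eq_or_ne o2 "00:17:f2" with rfl|k3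
  · rfl
  rcases eq_or_ne o2 "00:1f:f3" with rfl|k4
  · rfl
  rcases eq_or_ne o2 "00:25:00" with rfl|k5
  · rfl
  rcases eq_or_ne o2 "00:15:6d" with rfl|k6
  · rfl
  rcases eq_or_ne o2 "04:18:d6" with rfl|k7
  · rfl
  rcases eq_or_ne o2 "24:a4:3c" with rfl|k8
  · rfl
  simp [is_common_oui_pairing_py, is_common_oui_pairing_py_alt, pvCommonPairings, pvLoopA,
    pvOuiIndex_eval, PySem.Dict.get?_mk_cons, pv_get?_nil, PySem.Set.contains, PySem.Set.ofList,
    k0, Ne.symm k0, k1, Ne.symm k1, k2, Ne.symm k2, k3, Ne.symm k3, k4, Ne.symm k4, k5, Ne.symm k5, k6, Ne.symm k6, k7, Ne.symm k7, k8, Ne.symm k8]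

-- case oui1 = "00:26:ca": equality for every oui2, by cases on oui2
theorem pv_fix1 (o2 : String) : is_common_oui_pairing_py "00:26:ca" o2 = is_common_oui_pairing_py_alt "00:26:ca" o2 := by
  rcases eq_or_ne o2 "00:1b:d5" with rfl|k0
  · rfl
  rcases eq_or_ne o2 "00:26:ca" with rfl|k1
  · rfl
  rcases eq_or_ne o2 "00:23:04" with rfl|k2
  · rfl
  rcases eq_or_ne o2 "00:17:f2" with rfl|k3
  · rfl
  rcases eq_or_ne o2 "00:1f:f3" with rfl|k4
  · rfl
  rcases eq_or_ne o2 "00:25:00" with rfl|k5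
  · rfl
  rcases eq_or_ne o2 "00:15:6d" with rfl|k6
  · rfl
  rcases eq_or_ne o2 "04:18:d6" with rfl|k7
  · rfl
  rcases eq_or_ne o2 "24:a4:3c" with rfl|k8
  · rfl
  simp [is_common_oui_pairing_py, is_common_oui_pairing_py_alt, pvCommonPairings, pvLoopA,
    pvOuiIndex_eval, PySem.Dict.get?_mk_cons, pv_get?_nil, PySem.Set.contains, PySem.Set.ofList,
    k0, Ne.symm k0, k1, Ne.symm k1, k2, Ne.symm k2, k3, Ne.symm k3, k4, Ne.symm k4, k5, Ne.symm k5, k6, Ne.symm k6, k7, Ne.symm k7, k8, Ne.symm k8]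

-- case oui1 = "00:23:04": equality for every oui2, by cases on oui2
theorem pv_fix2 (o2 : String) : is_common_oui_pairing_py "00:23:04" o2 = is_common_oui_pairing_py_alt "00:23:04" o2 := by
  rcases eq_or_ne o2 "00:1b:d5" with rfl|k0
  · rfl
  rcases eq_or_ne o2 "00:26:ca" with rfl|k1
  · rfl
  rcases eq_or_ne o2 "00:23:04" with rfl|k2
  · rfl
  rcases eq_or_ne o2 "00:17:f2" with rfl|k3
  · rfl
  rcases eq_or_ne o2 "00:1f:f3" with rfl|k4
  · rfl
  rcases eq_or_ne o2 "00:25:00" with rfl|k5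
  · rfl
  rcases eq_or_ne o2 "00:15:6d" with rfl|k6
  · rfl
  rcases eq_or_ne o2 "04:18:d6" with rfl|k7
  · rfl
  rcases eq_or_ne o2 "24:a4:3c" with rfl|k8
  · rfl
  simp [is_common_oui_pairing_py, is_common_oui_pairing_py_alt, pvCommonPairings, pvLoopA,
    pvOuiIndex_eval, PySem.Dict.get?_mk_cons, pv_get?_nil, PySem.Set.contains, PySem.Set.ofList,
    k0, Ne.symm k0, k1, Ne.symm k1, k2, Ne.symm k2, k3, Ne.symm k3, k4, Ne.symm k4, k5, Ne.symm k5, k6, Ne.symm k6, k7, Ne.symm k7, k8, Ne.symm k8]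

-- case oui1 = "00:17:f2": equality for every oui2, by cases on oui2
theorem pv_fix3 (o2 : String) : is_common_oui_pairing_py "00:17:f2" o2 = is_common_oui_pairing_py_alt "00:17:f2" o2 := by
  rcases eq_or_ne o2 "00:1b:d5" with rfl|k0
  · rfl
  rcases eq_or_ne o2 "00:26:ca" with rfl|k1
  · rfl
  rcases eq_or_ne o2 "00:23:04" with rfl|k2
  · rfl
  rcases eq_or_ne o2 "00:17:f2" with rfl|k3
  · rfl
  rcases eq_or_ne o2 "00:1f:f3" with rfl|k4
  · rfl
  rcases eq_or_ne o2 "00:25:00" with rfl|k5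
  · rfl
  rcases eq_or_ne o2 "00:15:6d" with rfl|k6
  · rfl
  rcases eq_or_ne o2 "04:18:d6" with rfl|k7
  · rfl
  rcases eq_or_ne o2 "24:a4:3c" with rfl|k8
  · rfl
  simp [is_common_oui_pairing_py, is_common_oui_pairing_py_alt, pvCommonPairings, pvLoopA,
    pvOuiIndex_eval, PySem.Dict.get?_mk_cons, pv_get?_nil, PySem.Set.contains, PySem.Set.ofList,
    k0, Ne.symm k0, k1, Ne.symm k1, k2, Ne.symm k2, k3, Ne.symm k3, k4, Ne.symm k4, k5, Ne.symm k5, k6, Ne.symm k6, k7, Ne.symm k7, k8, Ne.symm k8]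

-- case oui1 = "00:1f:f3": equality for every oui2, by cases on oui2
theorem pv_fix4 (o2 : String) : is_common_oui_pairing_py "00:1f:f3" o2 = is_common_oui_pairing_py_alt "00:1f:f3" o2 := by
  rcases eq_or_ne o2 "00:1b:d5" with rfl|k0
  · rfl
  rcases eq_or_ne o2 "00:26:ca" with rfl|k1
  · rfl
  rcases eq_or_ne o2 "00:23:04" with rfl|k2
  · rfl
  rcases eq_or_ne o2 "00:17:f2" with rfl|k3
  · rfl
  rcases eq_or_ne o2 "00:1f:f3" with rfl|k4
  · rfl
  rcases eq_or_ne o2 "00:25:00" with rfl|k5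
  · rfl
  rcases eq_or_ne o2 "00:15:6d" with rfl|k6
  · rfl
  rcases eq_or_ne o2 "04:18:d6" with rfl|k7
  · rfl
  rcases eq_or_ne o2 "24:a4:3c" with rfl|k8
  · rfl
  simp [is_common_oui_pairing_py, is_common_oui_pairing_py_alt, pvCommonPairings, pvLoopA,
    pvOuiIndex_eval, PySem.Dict.get?_mk_cons, pv_get?_nil, PySem.Set.contains, PySem.Set.ofList,
    k0, Ne.symm k0, k1, Ne.symm k1, k2, Ne.symm k2, k3, Ne.symm k3, k4, Ne.symm k4, k5, Ne.symm k5, k6, Ne.symm k6, k7, Ne.symm k7, k8, Ne.symm k8]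

-- case oui1 = "00:25:00": equality for every oui2, by cases on oui2
theorem pv_fix5 (o2 : String) : is_common_oui_pairing_py "00:25:00" o2 = is_common_oui_pairing_py_alt "00:25:00" o2 := by
  rcases eq_or_ne o2 "00:1b:d5" with rfl|k0
  · rfl
  rcases eq_or_ne o2 "00:26:ca" with rfl|k1
  · rfl
  rcases eq_or_ne o2 "00:23:04" with rfl|k2
  · rfl
  rcases eq_or_ne o2 "00:17:f2" with rfl|k3
  · rfl
  rcases eq_or_ne o2 "00:1f:f3" with rfl|k4
  · rfl
  rcases eq_or_ne o2 "00:25:00" with rfl|k5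
  · rfl
  rcases eq_or_ne o2 "00:15:6d" with rfl|k6
  · rfl
  rcases eq_or_ne o2 "04:18:d6" with rfl|k7
  · rfl
  rcases eq_or_ne o2 "24:a4:3c" with rfl|k8
  · rfl
  simp [is_common_oui_pairing_py, is_common_oui_pairing_py_alt, pvCommonPairings, pvLoopA,
    pvOuiIndex_eval, PySem.Dict.get?_mk_cons, pv_get?_nil, PySem.Set.contains, PySem.Set.ofList,
    k0, Ne.symm k0, k1, Ne.symm k1, k2, Ne.symm k2, k3, Ne.symm k3, k4, Ne.symm k4, k5, Ne.symm k5, k6, Ne.symm k6, k7, Ne.symm k7, k8, Ne.symm k8]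

-- case oui1 = "00:15:6d": equality for every oui2, by cases on oui2
theorem pv_fix6 (o2 : String) : is_common_oui_pairing_py "00:15:6d" o2 = is_common_oui_pairing_py_alt "00:15:6d" o2 := by
  rcases eq_or_ne o2 "00:1b:d5" with rfl|k0
  · rfl
  rcases eq_or_ne o2 "00:26:ca" with rfl|k1
  · rfl
  rcases eq_or_ne o2 "00:23:04" with rfl|k2
  · rfl
  rcases eq_or_ne o2 "00:17:f2" with rfl|k3
  · rfl
  rcases eq_or_ne o2 "00:1f:f3" with rfl|k4
  · rfl
  rcases eq_or_ne o2 "00:25:00" with rfl|k5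
  · rfl
  rcases eq_or_ne o2 "00:15:6d" with rfl|k6
  · rfl
  rcases eq_or_ne o2 "04:18:d6" with rfl|k7
  · rfl
  rcases eq_or_ne o2 "24:a4:3c" with rfl|k8
  · rfl
  simp [is_common_oui_pairing_py, is_common_oui_pairing_py_alt, pvCommonPairings, pvLoopA,
    pvOuiIndex_eval, PySem.Dict.get?_mk_cons, pv_get?_nil, PySem.Set.contains, PySem.Set.ofList,
    k0, Ne.symm k0, k1, Ne.symm k1, k2, Ne.symm k2, k3, Ne.symm k3, k4, Ne.symm k4, k5, Ne.symm k5, k6, Ne.symm k6, k7, Ne.symm k7, k8, Ne.symm k8]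

-- case oui1 = "04:18:d6": equality for every oui2, by cases on oui2
theorem pv_fix7 (o2 : String) : is_common_oui_pairing_py "04:18:d6" o2 = is_common_oui_pairing_py_alt "04:18:d6" o2 := by
  rcases eq_or_ne o2 "00:1b:d5" with rfl|k0
  · rfl
  rcases eq_or_ne o2 "00:26:ca" with rfl|k1
  · rfl
  rcases eq_or_ne o2 "00:23:04" with rfl|k2
  · rfl
  rcases eq_or_ne o2 "00:17:f2" with rfl|k3
  · rfl
  rcases eq_or_ne o2 "00:1f:f3" with rfl|k4
  · rfl
  rcases eq_or_ne o2 "00:25:00" with rfl|k5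
  · rfl
  rcases eq_or_ne o2 "00:15:6d" with rfl|k6
  · rfl
  rcases eq_or_ne o2 "04:18:d6" with rfl|k7
  · rfl
  rcases eq_or_ne o2 "24:a4:3c" with rfl|k8
  · rfl
  simp [is_common_oui_pairing_py, is_common_oui_pairing_py_alt, pvCommonPairings, pvLoopA,
    pvOuiIndex_eval, PySem.Dict.get?_mk_cons, pv_get?_nil, PySem.Set.contains, PySem.Set.ofList,
    k0, Ne.symm k0, k1, Ne.symm k1, k2, Ne.symm k2, k3, Ne.symm k3, k4, Ne.symm k4, k5, Ne.symm k5, k6, Ne.symm k6, k7, Ne.symm k7, k8, Ne.symm k8]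

-- case oui1 = "24:a4:3c": equality for every oui2, by cases on oui2
theorem pv_fix8 (o2 : String) : is_common_oui_pairing_py "24:a4:3c" o2 = is_common_oui_pairing_py_alt "24:a4:3c" o2 := by
  rcases eq_or_ne o2 "00:1b:d5" with rfl|k0
  · rfl
  rcases eq_or_ne o2 "00:26:ca" with rfl|k1
  · rfl
  rcases eq_or_ne o2 "00:23:04" with rfl|k2
  · rfl
  rcases eq_or_ne o2 "00:17:f2" with rfl|k3
  · rfl
  rcases eq_or_ne o2 "00:1f:f3" with rfl|k4
  · rfl
  rcases eq_or_ne o2 "00:25:00" with rfl|k5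
  · rfl
  rcases eq_or_ne o2 "00:15:6d" with rfl|k6
  · rfl
  rcases eq_or_ne o2 "04:18:d6" with rfl|k7
  · rfl
  rcases eq_or_ne o2 "24:a4:3c" with rfl|k8
  · rfl
  simp [is_common_oui_pairing_py, is_common_oui_pairing_py_alt, pvCommonPairings, pvLoopA,
    pvOuiIndex_eval, PySem.Dict.get?_mk_cons, pv_get?_nil, PySem.Set.contains, PySem.Set.ofList,
    k0, Ne.symm k0, k1, Ne.symm k1, k2, Ne.symm k2, k3, Ne.symm k3, k4, Ne.symm k4, k5, Ne.symm k5, k6, Ne.symm k6, k7, Ne.symm k7, k8, Ne.symm k8]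

theorem pv_key (o1 o2 : String) : is_common_oui_pairing_py o1 o2 = is_common_oui_pairing_py_alt o1 o2 := by
  rcases eq_or_ne o1 "00:1b:d5" with rfl|h0
  · exact pv_fix0 o2
  rcases eq_or_ne o1 "00:26:ca" with rfl|h1
  · exact pv_fix1 o2
  rcases eq_or_ne o1 "00:23:04" with rfl|h2
  · exact pv_fix2 o2
  rcases eq_or_ne o1 "00:17:f2" with rfl|h3
  · exact pv_fix3 o2
  rcases eq_or_ne o1 "00:1f:f3" with rfl|h4
  · exact pv_fix4 o2
  rcases eq_or_ne o1 "00:25:00" with rfl|h5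
  · exact pv_fix5 o2
  rcases eq_or_ne o1 "00:15:6d" with rfl|h6
  · exact pv_fix6 o2
  rcases eq_or_ne o1 "04:18:d6" with rfl|h7
  · exact pv_fix7 o2
  rcases eq_or_ne o1 "24:a4:3c" with rfl|h8
  · exact pv_fix8 o2
  simp [is_common_oui_pairing_py, is_common_oui_pairing_py_alt, pvCommonPairings, pvLoopA,
    pvOuiIndex_eval, PySem.Dict.get?_mk_cons, pv_get?_nil, PySem.Set.contains, PySem.Set.ofList,
    h0, Ne.symm h0, h1, Ne.symm h1, h2, Ne.symm h2, h3, Ne.symm h3, h4, Ne.symm h4, h5, Ne.symm h5, h6, Ne.symm h6, h7, Ne.symm h7, h8, Ne.symm h8]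

-- ===== VERDICT (by name: the statement is the Claim_ definition above) =====
theorem is_common_oui_pairing_py_spec : Claim_equal_is_common_oui_pairing_py := by
  intro oui1 oui2 _
  exact pv_key oui1 oui2
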